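-- pv_equiv track=rewrite | github.com/rkim48/spikeinterface | icms-plasticity/util/util_functions.py | get_non_stim_periods
-- ===== SOURCE A (Python) =====
-- def get_non_stim_periods(all_stim_timestamps):
--     # returns tuple of non-stim intervals
--     non_stim_periods = []
--     last_end = None
--     for train in all_stim_timestamps:
--         if not train:
--             continue
--         if last_end is not None:
--             start_current_train = train[0]
--             non_stim_periods.append((last_end, start_current_train))
--         last_end = train[-1]
--     return non_stim_periods
-- ===== SOURCE B (Python) =====
-- def get_non_stim_periods(all_stim_timestamps):
--     # two phases: extract (first, last) endpoints of non-empty trains, then pair consecutive endpoints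
--     endpoints = [(train[0], train[-1]) for train in all_stim_timestamps if train]
--     return [(prev[1], cur[0]) for prev, cur in zip(endpoints, endpoints[1:])]
-- ===== Notes on version B (the rewrite author's own statement) =====
-- stated objective: simpler
-- what changed: Replaced the single stateful pass carrying a last_end accumulator by a two-phase filter-then-pairwise-zip: first extract each non-empty train's (first, last) endpoints, then zip consecutive endpoints into intervals.
import Mathlib
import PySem

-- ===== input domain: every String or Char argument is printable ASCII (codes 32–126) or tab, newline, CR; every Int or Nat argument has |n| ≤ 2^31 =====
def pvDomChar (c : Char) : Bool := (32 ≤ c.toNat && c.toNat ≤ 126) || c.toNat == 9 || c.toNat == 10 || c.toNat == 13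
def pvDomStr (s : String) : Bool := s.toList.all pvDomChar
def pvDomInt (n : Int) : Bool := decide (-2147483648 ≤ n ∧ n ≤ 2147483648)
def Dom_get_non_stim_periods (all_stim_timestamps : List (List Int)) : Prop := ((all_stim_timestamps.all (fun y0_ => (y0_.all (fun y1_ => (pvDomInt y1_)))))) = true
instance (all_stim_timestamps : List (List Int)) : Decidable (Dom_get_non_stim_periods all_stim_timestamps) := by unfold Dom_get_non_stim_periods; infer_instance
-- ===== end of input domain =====

-- B replaces A's single stateful pass (last_end accumulator) by a two-phase
-- endpoint-extraction then pairwise-zip decomposition; same O(n) cost, simpler.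


-- ===== PORT A =====
-- fold state = (non_stim_periods, last_end); train[0] = h, train[-1] = r.getLastD h on a non-empty train h :: r
def get_non_stim_periods (all_stim_timestamps : List (List Int)) : List (Int × Int) :=
  (all_stim_timestamps.foldl
    (fun (st : List (Int × Int) × Option Int) train =>
      match train with
      | [] => st
      | h :: r =>
        let acc :=
          match st.2 with
          | some last_end => st.1 ++ [(last_end, h)]
          | none => st.1
        (acc, some (r.getLastD h)))
    ([], none)).1

-- ===== PORT B =====
def get_non_stim_periods_alt (all_stim_timestamps : List (List Int)) : List (Int × Int) :=
  let endpoints := all_stim_timestamps.filterMap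
    (fun train => match train with
      | [] => none
      | h :: r => some (h, r.getLastD h))
  (endpoints.zip endpoints.tail).map (fun pc => (pc.1.2, pc.2.1))

-- ===== PRECONDITION & SPEC =====
def Spec_get_non_stim_periods (all_stim_timestamps : List (List Int)) (out : List (Int × Int)) : Prop := out = get_non_stim_periods_alt all_stim_timestamps
instance (all_stim_timestamps : List (List Int)) (out : List (Int × Int)) : Decidable (Spec_get_non_stim_periods all_stim_timestamps out) := by unfold Spec_get_non_stim_periods; infer_instance

-- ===== CLAIM (what is proved, stated in full; the proofs are below) =====
def Claim_equal_get_non_stim_periods : Prop := ∀ (all_stim_timestamps : List (List Int)), Dom_get_non_stim_periods all_stim_timestamps → Spec_get_non_stim_periods all_stim_timestamps (get_non_stim_periods all_stim_timestamps)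

-- ===== LEMMAS AND PROOFS =====

-- the chain of intervals when the previous train's last timestamp is `l`
def pvChainFrom (l : Int) : List (Int × Int) → List (Int × Int)
  | [] => []
  | e :: rest => (l, e.1) :: pvChainFrom e.2 rest

def pvStep (st : List (Int × Int) × Option Int) (train : List Int) : List (Int × Int) × Option Int :=
  match train with
  | [] => st
  | h :: r =>
    let acc :=
      match st.2 with
      | some last_end => st.1 ++ [(last_end, h)]
      | none => st.1
    (acc, some (r.getLastD h))

def pvEps (xs : List (List Int)) : List (Int × Int) :=
  xs.filterMap (fun train => match train with
    | [] => none
    | h :: r => some (h, r.getLastD h))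

lemma foldl_some (xs : List (List Int)) : ∀ (acc : List (Int × Int)) (l : Int),
    (xs.foldl pvStep (acc, some l)).1 = acc ++ pvChainFrom l (pvEps xs) := by
  induction xs with
  | nil => intro acc l; simp [pvEps, pvChainFrom]
  | cons t rest ih =>
    intro acc l
    cases t with
    | nil => simpa [pvEps, pvStep] using ih acc l
    | cons h r =>
      simp [pvEps, pvStep, pvChainFrom, ih]

lemma foldl_none (xs : List (List Int)) : ∀ (acc : List (Int × Int)),
    (xs.foldl pvStep (acc, none)).1 =
      acc ++ (match pvEps xs with
              | [] => []
              | e :: rest => pvChainFrom e.2 rest) := by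
  induction xs with
  | nil => intro acc; simp [pvEps]
  | cons t rest ih =>
    intro acc
    cases t with
    | nil => simpa [pvEps, pvStep] using ih acc
    | cons h r =>
      simp [pvEps, pvStep, foldl_some]

lemma zip_chain_cons (rest : List (Int × Int)) : ∀ (e : Int × Int),
    (((e :: rest).zip rest).map (fun pc => (pc.1.2, pc.2.1))) = pvChainFrom e.2 rest := by
  induction rest with
  | nil => intro e; simp [pvChainFrom]
  | cons e2 r ih => intro e; simp [pvChainFrom, ih e2]

lemma zip_chain (eps : List (Int × Int)) :
    ((eps.zip eps.tail).map (fun pc => (pc.1.2, pc.2.1))) =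
      (match eps with
       | [] => []
       | e :: rest => pvChainFrom e.2 rest) := by
  cases eps with
  | nil => simp
  | cons e rest => simpa using zip_chain_cons rest e

-- ===== VERDICT (by name: the statement is the Claim_ definition above) =====
theorem get_non_stim_periods_spec : Claim_equal_get_non_stim_periods := by
  intro xs _
  show get_non_stim_periods xs = get_non_stim_periods_alt xs
  have hA : get_non_stim_periods xs = (xs.foldl pvStep ([], none)).1 := rfl
  rw [hA, foldl_none]
  have hB : get_non_stim_periods_alt xs =
      ((pvEps xs).zip (pvEps xs).tail).map (fun pc => (pc.1.2, pc.2.1)) := rfl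
  rw [hB, zip_chain]
  simp
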